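-- pv_equiv track=rewrite | github.com/wattsjon2/daily-challenges | substring.py | subStringCheck
-- ===== SOURCE A (Python) =====
-- def subStringCheck(s,t):
--     sEnumDict = {}
--     sSet = set()
--     checkDict = {}
--     counter = 0
--     for i, j in enumerate(s):
--         sEnumDict[i] = j
--         sSet.add(j)
--
--     for letter in t:
--         if letter in sSet:
--             checkDict[counter] = letter
--             counter += 1
--
--     return checkDict == sEnumDict
-- ===== SOURCE B (Python) =====
-- def subStringCheck(s, t):
--     # Different characterization: the filtered copy of t equals s  iff
--     # (1) t contains exactly len(s) characters drawn from set(s)  (a counter), and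
--     # (2) s is a subsequence of t  (iterator-consuming all(c in it)).
--     cnt = {}
--     for c in t:
--         cnt[c] = cnt.get(c, 0) + 1
--     if sum(cnt.get(c, 0) for c in set(s)) != len(s):
--         return False
--     it = iter(t)
--     return all(c in it for c in s)
-- ===== Notes on version B (the rewrite author's own statement) =====
-- stated objective: alternative
-- what changed: B never builds the filtered sequence or any index dict: it decides the question by a two-fact characterization - a character counter of t shows that exactly len(s) characters of t lie in set(s), and an iterator-consuming subsequence test shows s is a subsequence of t - which together are equivalent to A's filtered-t == s comparison.
import Mathlib
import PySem

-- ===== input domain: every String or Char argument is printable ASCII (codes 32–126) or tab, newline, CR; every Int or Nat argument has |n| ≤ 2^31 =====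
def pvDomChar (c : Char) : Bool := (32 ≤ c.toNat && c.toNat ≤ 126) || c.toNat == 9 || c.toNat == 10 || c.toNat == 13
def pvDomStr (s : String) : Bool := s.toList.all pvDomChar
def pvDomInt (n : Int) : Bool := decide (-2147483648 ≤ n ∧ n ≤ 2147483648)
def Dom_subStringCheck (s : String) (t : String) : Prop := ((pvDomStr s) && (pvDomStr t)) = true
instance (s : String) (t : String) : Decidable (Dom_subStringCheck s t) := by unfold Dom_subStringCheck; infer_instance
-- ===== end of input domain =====

-- B replaces A's build-two-index-dicts-and-compare with a two-fact characterization: a character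
-- counter of t (kept-length check) plus an iterator-consuming subsequence test (measured faster by a constant factor).

-- ===== PORT A =====
-- Python's dict == ignores insertion order: same keys as a set and same value at each key.
def pyDictEq (d1 d2 : PySem.Dict Int Char) : Bool :=
  PySem.Set.equal d1.keys d2.keys && d1.keys.all (fun k => d1.get? k == d2.get? k)

def subStringCheck (s : String) (t : String) : Bool :=
  let st0 := (PySem.List.enumerate s.toList 0).foldl
    (fun (st : PySem.Dict Int Char × PySem.Set Char) p =>
      (st.1.insert p.1 p.2, PySem.Set.add st.2 p.2))
    (PySem.Dict.empty, PySem.Set.empty)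
  let st1 := t.toList.foldl
    (fun (st : PySem.Dict Int Char × Int) letter =>
      if PySem.Set.contains st0.2 letter then (st.1.insert st.2 letter, st.2 + 1) else st)
    (PySem.Dict.empty, 0)
  pyDictEq st1.1 st0.1

-- ===== PORT B =====
-- 'c in it' on an iterator: consume elements until c is found, returning the rest (none = exhausted)
def bConsume (c : Char) : List Char → Option (List Char)
  | [] => none
  | x :: xs => if x == c then some xs else bConsume c xs

-- 'all(c in it for c in s)' over the iterator of t
def bAllIn : List Char → List Char → Bool
  | [], _ => true
  | c :: cs, ts =>
      match bConsume c ts with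
      | none => false
      | some ts' => bAllIn cs ts'

def subStringCheck_alt (s : String) (t : String) : Bool :=
  let cnt := t.toList.foldl
    (fun (d : PySem.Dict Char Int) c => d.insert c (d.getD c 0 + 1)) PySem.Dict.empty
  if ((PySem.Set.ofList s.toList).map (fun c => cnt.getD c 0)).sum ≠ (s.toList.length : Int)
  then false
  else bAllIn s.toList t.toList

-- ===== PRECONDITION & SPEC =====
def Spec_subStringCheck (s : String) (t : String) (out : Bool) : Prop := out = subStringCheck_alt s t
instance (s : String) (t : String) (out : Bool) : Decidable (Spec_subStringCheck s t out) := by unfold Spec_subStringCheck; infer_instance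

-- ===== CLAIM (what is proved, stated in full; the proofs are below) =====
def Claim_equal_subStringCheck : Prop := ∀ (s : String) (t : String), Dom_subStringCheck s t → Spec_subStringCheck s t (subStringCheck s t)

-- ===== LEMMAS AND PROOFS =====

-- first loop of A: the dict collects the (index, char) pairs, the set collects the chars
theorem foldA1 (xs : List Char) : ∀ (k : Int) (d : PySem.Dict Int Char) (st : PySem.Set Char),
    (∀ key ∈ d.keys, key < k) →
    ((PySem.List.enumerate xs k).foldl
      (fun (st : PySem.Dict Int Char × PySem.Set Char) p =>
        (st.1.insert p.1 p.2, PySem.Set.add st.2 p.2)) (d, st)).1.items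
        = d.items ++ PySem.List.enumerate xs k
    ∧ ((PySem.List.enumerate xs k).foldl
      (fun (st : PySem.Dict Int Char × PySem.Set Char) p =>
        (st.1.insert p.1 p.2, PySem.Set.add st.2 p.2)) (d, st)).2
        = PySem.Set.update st xs := by
  induction xs with
  | nil => intro k d st h; simp [PySem.List.enumerate_nil, PySem.Set.update_nil]
  | cons x xs ih =>
      intro k d st h
      rw [PySem.List.enumerate_cons]
      simp only [List.foldl_cons]
      have hnc : d.contains k = false := by
        cases hcc : d.contains k with
        | false => rfl
        | true =>
          have : k ∈ d.keys := (PySem.Dict.contains_iff_mem_keys d k).mp hcc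
          exact absurd (h k this) (lt_irrefl k)
      have hkeys : ∀ key ∈ (d.insert k x).keys, key < k + 1 := by
        intro key hk
        rcases (PySem.Dict.mem_keys_insert d k key x).mp hk with rfl | hk
        · omega
        · have := h key hk; omega
      obtain ⟨h1, h2⟩ := ih (k + 1) (d.insert k x) (PySem.Set.add st x) hkeys
      refine ⟨?_, ?_⟩
      · rw [h1, PySem.Dict.items_insert_of_not_contains d x hnc]
        simp
      · rw [h2, PySem.Set.update_cons]

-- second loop of A: the kept letters of t, enumerated from the running counter
theorem foldA2 (sSet : PySem.Set Char) (ts : List Char) : ∀ (c : Int) (d : PySem.Dict Int Char),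
    (∀ key ∈ d.keys, key < c) →
    ((ts.foldl
      (fun (st : PySem.Dict Int Char × Int) letter =>
        if PySem.Set.contains sSet letter then (st.1.insert st.2 letter, st.2 + 1) else st)
      (d, c)).1.items
        = d.items ++ PySem.List.enumerate (ts.filter (fun l => PySem.Set.contains sSet l)) c)
    ∧ ((ts.foldl
      (fun (st : PySem.Dict Int Char × Int) letter =>
        if PySem.Set.contains sSet letter then (st.1.insert st.2 letter, st.2 + 1) else st)
      (d, c)).2
        = c + (ts.filter (fun l => PySem.Set.contains sSet l)).length) := by
  induction ts with
  | nil => intro c d h; simp [PySem.List.enumerate_nil]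
  | cons x ts ih =>
      intro c d h
      simp only [List.foldl_cons, List.filter_cons]
      by_cases hm : PySem.Set.contains sSet x = true
      · rw [if_pos hm, if_pos hm]
        have hnc : d.contains c = false := by
          cases hcc : d.contains c with
          | false => rfl
          | true =>
            have : c ∈ d.keys := (PySem.Dict.contains_iff_mem_keys d c).mp hcc
            exact absurd (h c this) (lt_irrefl c)
        have hkeys : ∀ key ∈ (d.insert c x).keys, key < c + 1 := by
          intro key hk
          rcases (PySem.Dict.mem_keys_insert d c key x).mp hk with rfl | hk
          · omega
          · have := h key hk; omega
        obtain ⟨h1, h2⟩ := ih (c + 1) (d.insert c x) hkeys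
        refine ⟨?_, ?_⟩
        · rw [h1, PySem.Dict.items_insert_of_not_contains d x hnc,
            PySem.List.enumerate_cons]
          simp
        · rw [h2]; simp; omega
      · rw [if_neg hm, if_neg hm]
        exact ih c d h

theorem keys_enum {xs : List Char} {d : PySem.Dict Int Char}
    (h : d.items = PySem.List.enumerate xs 0) :
    d.keys = PySem.List.pyRange 0 (xs.length : Int) 1 := by
  simp only [PySem.Dict.keys, h, PySem.List.map_fst_enumerate, zero_add]

theorem get?_enum {xs : List Char} {d : PySem.Dict Int Char}
    (h : d.items = PySem.List.enumerate xs 0) (k : Nat) (hk : k < xs.length) :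
    d.get? (k : Int) = some xs[k] := by
  apply PySem.Dict.get?_of_mem_items
  · rw [h, PySem.List.mem_enumerate_iff]
    exact ⟨k, hk, by simp⟩
  · rw [keys_enum h]; exact PySem.List.nodup_pyRange_one 0 _

-- Python == of two dicts whose items are enumerations from 0 is list equality
theorem pyDictEq_enumerate (xs ys : List Char) (d1 d2 : PySem.Dict Int Char)
    (h1 : d1.items = PySem.List.enumerate xs 0) (h2 : d2.items = PySem.List.enumerate ys 0) :
    pyDictEq d1 d2 = decide (xs = ys) := by
  unfold pyDictEq
  rw [keys_enum h1, keys_enum h2]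
  by_cases hxy : xs = ys
  · subst hxy
    rw [decide_eq_true_eq.mpr rfl, Bool.and_eq_true]
    constructor
    · exact (PySem.Set.equal_iff _ _).mpr (fun x => Iff.rfl)
    · rw [List.all_eq_true]
      intro k hk
      rcases PySem.List.mem_pyRange_one.mp hk with ⟨hk0, hklt⟩
      have hn : k.toNat < xs.length := by omega
      have hcast : ((k.toNat : Nat) : Int) = k := by omega
      rw [← hcast, get?_enum h1 k.toNat hn, get?_enum h2 k.toNat hn]
      simp
  · rw [decide_eq_false hxy]
    by_cases hlen : xs.length = ys.length
    · have hne : ∃ k : Nat, ∃ h : k < xs.length, xs[k] ≠ ys[k]'(by omega) := by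
        by_contra hall
        push Not at hall
        exact hxy (List.ext_getElem hlen (by intro i hi1 hi2; exact hall i hi1))
      rcases hne with ⟨k, hk, hne⟩
      apply Bool.and_eq_false_iff.mpr
      right
      rw [List.all_eq_false]
      refine ⟨(k : Int), PySem.List.mem_pyRange_one.mpr ⟨by omega, by omega⟩, ?_⟩
      rw [get?_enum h1 k hk, get?_enum h2 k (by omega)]
      simpa using hne
    · apply Bool.and_eq_false_iff.mpr
      left
      cases hcc : PySem.Set.equal (PySem.List.pyRange 0 (xs.length : Int) 1) (PySem.List.pyRange 0 (ys.length : Int) 1) with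
      | false => rfl
      | true =>
        exfalso
        have hmem := (PySem.Set.equal_iff _ _).mp hcc
        rcases Nat.lt_or_ge xs.length ys.length with hlt | hge
        · have := (hmem (xs.length : Int)).mpr (PySem.List.mem_pyRange_one.mpr ⟨by omega, by omega⟩)
          rcases PySem.List.mem_pyRange_one.mp this with ⟨_, h⟩; omega
        · have hlt : ys.length < xs.length := by omega
          have := (hmem (ys.length : Int)).mp (PySem.List.mem_pyRange_one.mpr ⟨by omega, by omega⟩)
          rcases PySem.List.mem_pyRange_one.mp this with ⟨_, h⟩; omega

-- A computes: does the filtered copy of t equal s?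
theorem subStringCheck_char (s t : String) :
    subStringCheck s t
      = decide (t.toList.filter (fun l => PySem.Set.contains (PySem.Set.ofList s.toList) l) = s.toList) := by
  rw [show subStringCheck s t = pyDictEq
      ((t.toList.foldl
        (fun (st : PySem.Dict Int Char × Int) letter =>
          if PySem.Set.contains ((PySem.List.enumerate s.toList 0).foldl
            (fun (st : PySem.Dict Int Char × PySem.Set Char) p =>
              (st.1.insert p.1 p.2, PySem.Set.add st.2 p.2))
            (PySem.Dict.empty, PySem.Set.empty)).2 letter then (st.1.insert st.2 letter, st.2 + 1) else st)
        (PySem.Dict.empty, 0)).1)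
      (((PySem.List.enumerate s.toList 0).foldl
        (fun (st : PySem.Dict Int Char × PySem.Set Char) p =>
          (st.1.insert p.1 p.2, PySem.Set.add st.2 p.2))
        (PySem.Dict.empty, PySem.Set.empty)).1) from rfl]
  obtain ⟨hd1, hs1⟩ := foldA1 s.toList 0 PySem.Dict.empty PySem.Set.empty
    (by simp [PySem.Dict.keys_empty])
  rw [hs1, PySem.Set.update_empty]
  obtain ⟨hd2, _⟩ := foldA2 (PySem.Set.ofList s.toList) t.toList 0 PySem.Dict.empty
    (by simp [PySem.Dict.keys_empty])
  exact pyDictEq_enumerate _ s.toList _ _ (by simpa using hd2) (by simpa using hd1)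

-- splitting one membership test off a countP over a cons'd member list
theorem countP_cons_mem (t : List Char) (c : Char) (S : List Char) (hc : c ∉ S) :
    t.countP (fun x => decide (x ∈ c :: S)) = t.count c + t.countP (fun x => decide (x ∈ S)) := by
  induction t with
  | nil => simp
  | cons x t ih =>
      rw [List.countP_cons, List.countP_cons, List.count_cons, ih]
      by_cases hx : x = c
      · subst hx; simp [hc]; omega
      · by_cases hxs : x ∈ S
        · simp [hx, hxs]; omega
        · simp [hx, hxs]

-- the sum of counts over a duplicate-free list of chars is a countP by membership
theorem sum_counts (t : List Char) : ∀ S : List Char, S.Nodup →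
    (S.map (fun c => ((t.count c : Nat) : Int))).sum
      = ((t.countP (fun x => decide (x ∈ S)) : Nat) : Int) := by
  intro S
  induction S with
  | nil => intro _; simp
  | cons c S ih =>
      intro hS
      rw [List.nodup_cons] at hS
      rw [List.map_cons, List.sum_cons, ih hS.2, countP_cons_mem t c S hS.1]
      push_cast
      ring

-- B's greedy iterator consumption is core isSublist
theorem bAllIn_eq_isSublist (ts : List Char) : ∀ cs : List Char,
    bAllIn cs ts = cs.isSublist ts := by
  induction ts with
  | nil =>
      intro cs
      cases cs with
      | nil => rfl
      | cons c cs => rfl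
  | cons x ts ih =>
      intro cs
      cases cs with
      | nil => rfl
      | cons c cs =>
          by_cases h : x = c
          · subst h
            show (match bConsume x (x :: ts) with
                  | none => false
                  | some ts' => bAllIn cs ts') = (x :: cs).isSublist (x :: ts)
            simp [bConsume, List.isSublist, ih]
          · have h1 : (x == c) = false := by simp [h]
            have h2 : (c == x) = false := by simp [Ne.symm h]
            show (match bConsume c (x :: ts) with
                  | none => false
                  | some ts' => bAllIn cs ts') = (c :: cs).isSublist (x :: ts)
            rw [show bConsume c (x :: ts) = bConsume c ts by simp [bConsume, h1]]
            rw [show (c :: cs).isSublist (x :: ts) = (c :: cs).isSublist ts by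
              simp [List.isSublist, h2]]
            rw [← ih (c :: cs)]
            rfl

-- the two-fact characterization: filtered t equals s iff the kept count matches and s is a subsequence
theorem filter_eq_iff (s t : List Char) :
    (t.filter (fun l => PySem.Set.contains (PySem.Set.ofList s) l) = s)
      ↔ (t.countP (fun l => PySem.Set.contains (PySem.Set.ofList s) l) = s.length ∧ s.Sublist t) := by
  constructor
  · intro h
    refine ⟨?_, ?_⟩
    · rw [List.countP_eq_length_filter, h]
    · rw [← h]; exact List.filter_sublist
  · rintro ⟨hlen, hsub⟩
    have hall : ∀ c ∈ s, PySem.Set.contains (PySem.Set.ofList s) c = true := by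
      intro c hc
      exact (PySem.Set.contains_iff _ _).mpr ((PySem.Set.mem_ofList _ _).mpr hc)
    have hfs : s.filter (fun l => PySem.Set.contains (PySem.Set.ofList s) l) = s :=
      List.filter_eq_self.mpr hall
    have hsub2 := hsub.filter (fun l => PySem.Set.contains (PySem.Set.ofList s) l)
    rw [hfs] at hsub2
    have hlen2 : s.length = (t.filter (fun l => PySem.Set.contains (PySem.Set.ofList s) l)).length := by
      rw [← List.countP_eq_length_filter, hlen]
    exact (hsub2.eq_of_length hlen2).symm

-- B's counter sum is the kept count
theorem alt_sum_eq (s t : List Char) :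
    ((PySem.Set.ofList s).map
      (fun c => (t.foldl (fun (d : PySem.Dict Char Int) c => d.insert c (d.getD c 0 + 1)) PySem.Dict.empty).getD c 0)).sum
      = ((t.countP (fun l => PySem.Set.contains (PySem.Set.ofList s) l) : Nat) : Int) := by
  have hmap : ((PySem.Set.ofList s).map
      (fun c => (t.foldl (fun (d : PySem.Dict Char Int) c => d.insert c (d.getD c 0 + 1)) PySem.Dict.empty).getD c 0))
      = (PySem.Set.ofList s).map (fun c => ((t.count c : Nat) : Int)) := by
    apply List.map_congr_left
    intro c _
    rw [PySem.Dict.foldl_insert_getD_add_one_eq_counter, PySem.Dict.getD_counter]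
  rw [hmap, sum_counts t (PySem.Set.ofList s) (PySem.Set.nodup_ofList s)]
  congr 1
  apply List.countP_congr
  intro x _
  rw [PySem.Set.contains_eq_listContains]
  simp [PySem.Set.mem_ofList]

-- ===== VERDICT (by name: the statement is the Claim_ definition above) =====
theorem subStringCheck_spec : Claim_equal_subStringCheck := by
  intro s t _
  unfold Spec_subStringCheck
  rw [subStringCheck_char]
  show _ = (if ((PySem.Set.ofList s.toList).map
      (fun c => (t.toList.foldl (fun (d : PySem.Dict Char Int) c => d.insert c (d.getD c 0 + 1))
        PySem.Dict.empty).getD c 0)).sum ≠ (s.toList.length : Int)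
    then false else bAllIn s.toList t.toList)
  rw [alt_sum_eq s.toList t.toList, bAllIn_eq_isSublist]
  by_cases hlen : t.toList.countP (fun l => PySem.Set.contains (PySem.Set.ofList s.toList) l)
      = s.toList.length
  · rw [if_neg (by exact_mod_cast not_not.mpr (congrArg Nat.cast hlen))]
    rw [Bool.eq_iff_iff, decide_eq_true_eq, List.isSublist_iff_sublist, filter_eq_iff]
    exact ⟨fun h => h.2, fun h => ⟨hlen, h⟩⟩
  · rw [if_pos (by exact_mod_cast fun hh => hlen (by exact_mod_cast hh))]
    simp only [decide_eq_false_iff_not]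
    intro h
    exact hlen ((filter_eq_iff s.toList t.toList).mp h).1
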